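-- pv_equiv track=rewrite | github.com/LChanger/LeetCode | alibaba/grid.py | get
-- ===== SOURCE A (Python) =====
-- def get(n,k,grid):
--     def dfs(i,j,val):
--         if i<0 or i>=n or j<0 or j>=n or visited[i][j] or grid[i][j]<=val:return 0
--         maxValueA=0
--         maxValueB=0
--         maxValueC=0
--         maxValueD=0
--         visited[i][j]=True
--         for kk in range(1,k+1):
--             a=dfs(i-kk,j,grid[i][j])
--             maxValueA=max(maxValueA,a)
--             # b=dfs(i+k,j,grid[i][j])
--             # c=dfs(i,j-k,grid[i][j])
--             # d=dfs(i,j+k,grid[i][j])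
--             # maxtemp=max(d,max(c,max(a,b)))
--             # if maxtemp>maxValue:maxValue=maxtemp
--         for kk in range(1,k+1):
--             b=dfs(i+kk,j,grid[i][j])
--             maxValueB=max(maxValueB,b)
--         for kk in range(1,k+1):
--             c=dfs(i,j-kk,grid[i][j])
--             maxValueC=max(maxValueC,c)
--         for kk in range(1,k+1):
--             d=dfs(i,j+kk,grid[i][j])
--             maxValueD=max(maxValueD,d)
--         visited[i][j]=False
--         maxValue=max(maxValueA,max(maxValueB,max(maxValueC,maxValueD)))
--         return maxValue+grid[i][j]
--     visited=[[False]*n for i in range(n)]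
--     return dfs(0,0,0)
-- ===== SOURCE B (Python) =====
-- def get(n, k, grid):
--     if n <= 0 or grid[0][0] <= 0:
--         # no strictly-increasing path can start: (0,0) is out of range or its value is not > 0
--         return 0
--     cells = sorted(((i, j) for i in range(n) for j in range(n)),
--                    key=lambda c: grid[c[0]][c[1]], reverse=True)
--     dp = {}
--     for (i, j) in cells:
--         v = grid[i][j]
--         best = 0
--         for (di, dj) in ((-1, 0), (1, 0), (0, -1), (0, 1)):
--             for kk in range(1, k + 1):
--                 a, b = i + di * kk, j + dj * kk
--                 if 0 <= a < n and 0 <= b < n and grid[a][b] > v: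
--                     best = max(best, dp.get((a, b), 0))
--         dp[(i, j)] = v + best
--     return dp.get((0, 0), 0)
-- ===== Notes on version B (the rewrite author's own statement) =====
-- stated objective: alternative
-- what changed: Replaces A's exponential backtracking DFS (whose visited set is redundant on a strictly increasing path) by one dynamic-programming pass over the cells sorted by decreasing value, computing each cell's best path sum once into a dict; Pre_ excludes grids missing part of the n x n block when grid[0][0] > 0, where A can still return if its search happens to stay in range but B, which reads every cell, raises IndexError.
-- outside the precondition, e.g. on get(5, 0, [[3]]): A returns 3, B raises IndexError
import Mathlib
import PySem

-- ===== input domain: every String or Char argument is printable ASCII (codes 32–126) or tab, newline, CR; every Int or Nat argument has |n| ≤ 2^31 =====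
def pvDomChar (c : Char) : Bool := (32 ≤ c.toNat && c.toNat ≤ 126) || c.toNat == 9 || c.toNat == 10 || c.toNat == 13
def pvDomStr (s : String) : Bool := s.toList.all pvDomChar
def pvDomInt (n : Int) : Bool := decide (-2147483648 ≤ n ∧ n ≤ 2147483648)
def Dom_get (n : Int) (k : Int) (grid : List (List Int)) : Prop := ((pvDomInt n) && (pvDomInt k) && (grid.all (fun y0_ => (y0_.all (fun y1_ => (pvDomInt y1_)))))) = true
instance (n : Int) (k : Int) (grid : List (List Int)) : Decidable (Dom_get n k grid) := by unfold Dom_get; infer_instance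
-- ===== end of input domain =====

-- B replaces A's exponential backtracking DFS by a single DP pass over the cells sorted by
-- decreasing value (the visited set is redundant on a strictly increasing path); objective: alternative.

-- shared helper: grid[i][j] (total stand-in; Pre_get guarantees every access is in range)
def cellAt (grid : List (List Int)) (i j : Int) : Int :=
  PySem.List.pyGetD (PySem.List.pyGetD grid i []) j 0

-- all coordinates (i, j) with 0 ≤ i, j < n (the order Python's nested generator produces)
def cellsOf (n : Int) : List (Int × Int) :=
  (PySem.List.pyRange 0 n 1).flatMap (fun i => (PySem.List.pyRange 0 n 1).map (fun j => (i, j)))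

theorem mem_cellsOf {a b n : Int} : (a, b) ∈ cellsOf n ↔ (0 ≤ a ∧ a < n) ∧ (0 ≤ b ∧ b < n) := by
  simp [cellsOf, PySem.List.mem_pyRange_one]

-- termination measure for A's DFS: how many cells still have a value above `val`
def countGT (n : Int) (grid : List (List Int)) (val : Int) : Nat :=
  (cellsOf n).countP (fun c => decide (val < cellAt grid c.1 c.2))

theorem countP_lt_of {α : Type} (l : List α) (p q : α → Bool)
    (h : ∀ x ∈ l, p x → q x) (x0 : α) (hx0 : x0 ∈ l) (hp : ¬ p x0) (hq : q x0) :
    l.countP p < l.countP q := by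
  induction l with
  | nil => cases hx0
  | cons a t ih =>
    rw [List.countP_cons, List.countP_cons]
    rcases List.mem_cons.mp hx0 with h0 | h0
    · subst h0
      have hp' : p x0 = false := by revert hp; cases p x0 <;> simp
      have hle := List.countP_mono_left (l := t) (fun x hx => h x (List.mem_cons_of_mem _ hx))
      simp [hq, hp']
      omega
    · have hlt := ih (fun x hx => h x (List.mem_cons_of_mem _ hx)) h0
      by_cases hpa : p a
      · have hqa := h a List.mem_cons_self hpa
        simp [hpa, hqa]; omega
      · simp [hpa]; omega

theorem countGT_lt (n : Int) (grid : List (List Int)) (i j val : Int)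
    (h1 : 0 ≤ i) (h2 : i < n) (h3 : 0 ≤ j) (h4 : j < n) (h5 : val < cellAt grid i j) :
    countGT n grid (cellAt grid i j) < countGT n grid val := by
  unfold countGT
  exact countP_lt_of _ _ _
    (fun x _ hx => by
      simp only [decide_eq_true_eq] at hx ⊢
      exact lt_trans h5 hx)
    (i, j) (mem_cellsOf.mpr ⟨⟨h1, h2⟩, ⟨h3, h4⟩⟩) (by simp) (by simpa using h5)

-- ===== PORT A =====
-- A's dfs; the mutable `visited` matrix is carried as the list of coordinates currently set to
-- True (set before the recursive calls, reset after: so the children see visited ∪ {(i,j)}).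
def dfsA (n k : Int) (grid : List (List Int)) (visited : List (Int × Int)) (i j val : Int) : Int :=
  if h : i < 0 ∨ n ≤ i ∨ j < 0 ∨ n ≤ j ∨ (i, j) ∈ visited ∨ cellAt grid i j ≤ val then 0
  else
    let mA := (PySem.List.pyRange 1 (k+1) 1).foldl
      (fun m kk => max m (dfsA n k grid ((i, j) :: visited) (i - kk) j (cellAt grid i j))) 0
    let mB := (PySem.List.pyRange 1 (k+1) 1).foldl
      (fun m kk => max m (dfsA n k grid ((i, j) :: visited) (i + kk) j (cellAt grid i j))) 0
    let mC := (PySem.List.pyRange 1 (k+1) 1).foldl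
      (fun m kk => max m (dfsA n k grid ((i, j) :: visited) i (j - kk) (cellAt grid i j))) 0
    let mD := (PySem.List.pyRange 1 (k+1) 1).foldl
      (fun m kk => max m (dfsA n k grid ((i, j) :: visited) i (j + kk) (cellAt grid i j))) 0
    max mA (max mB (max mC mD)) + cellAt grid i j
termination_by countGT n grid val
decreasing_by
  all_goals
    push_neg at h
    exact countGT_lt n grid i j val h.1 h.2.1 h.2.2.1 h.2.2.2.1 h.2.2.2.2.2

def get (n : Int) (k : Int) (grid : List (List Int)) : Int :=
  dfsA n k grid [] 0 0 0

-- ===== PORT B =====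
def dirs : List (Int × Int) := [(-1, 0), (1, 0), (0, -1), (0, 1)]

-- Source B's inner double loop: best successor value reachable from (i, j), read through `lk`
def innerBest (n k : Int) (grid : List (List Int)) (lk : Int × Int → Int) (i j : Int) : Int :=
  dirs.foldl (fun best d =>
    (PySem.List.pyRange 1 (k + 1) 1).foldl (fun best kk =>
      if 0 ≤ i + d.1 * kk ∧ i + d.1 * kk < n ∧ 0 ≤ j + d.2 * kk ∧ j + d.2 * kk < n ∧
         cellAt grid i j < cellAt grid (i + d.1 * kk) (j + d.2 * kk) then
        max best (lk (i + d.1 * kk, j + d.2 * kk))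
      else best) best) 0

def dpStep (n k : Int) (grid : List (List Int))
    (dp : PySem.Dict (Int × Int) Int) (c : Int × Int) : PySem.Dict (Int × Int) Int :=
  dp.insert c (cellAt grid c.1 c.2 + innerBest n k grid (fun q => dp.getD q 0) c.1 c.2)

def buildDp (n k : Int) (grid : List (List Int)) : PySem.Dict (Int × Int) Int :=
  (PySem.List.sorted (cellsOf n) (fun c => cellAt grid c.1 c.2) true).foldl
    (dpStep n k grid) PySem.Dict.empty

def get_alt (n : Int) (k : Int) (grid : List (List Int)) : Int :=
  if n ≤ 0 then 0
  else if cellAt grid 0 0 ≤ 0 then 0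
  else (buildDp n k grid).getD (0, 0) 0

-- ===== PRECONDITION & SPEC =====
-- When its search leaves (0,0), A touches only the cells it reaches and so can return on a grid
-- narrower than n×n; B reads the whole n×n block then and raises IndexError, so Pre_ asks for the
-- full n×n block except in the trivial cases (n ≤ 0, or grid[0][0] ≤ 0) where both stop at once.
def Pre_get (n : Int) (k : Int) (grid : List (List Int)) : Prop :=
  n ≤ 0 ∨ (0 < grid.length ∧ 0 < (grid.headD []).length ∧
    (cellAt grid 0 0 ≤ 0 ∨
      (n ≤ (grid.length : Int) ∧ ∀ row ∈ grid.take n.toNat, n ≤ (row.length : Int))))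
instance (n : Int) (k : Int) (grid : List (List Int)) : Decidable (Pre_get n k grid) := by
  unfold Pre_get; infer_instance

def pvWitness_get : Int × Int × List (List Int) := (2, 1, [[1, 2], [4, 3]])

def Spec_get (n : Int) (k : Int) (grid : List (List Int)) (out : Int) : Prop := out = get_alt n k grid
instance (n : Int) (k : Int) (grid : List (List Int)) (out : Int) : Decidable (Spec_get n k grid out) := by unfold Spec_get; infer_instance

-- ===== CLAIM (what is proved, stated in full; the proofs are below) =====
def Claim_equal_get : Prop := ∀ (n : Int) (k : Int) (grid : List (List Int)), Dom_get n k grid → Pre_get n k grid → Spec_get n k grid (get n k grid)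

-- ===== LEMMAS AND PROOFS =====

theorem nodup_cellsOf (n : Int) : (cellsOf n).Nodup := by
  have h : cellsOf n = (PySem.List.pyRange 0 n 1) ×ˢ (PySem.List.pyRange 0 n 1) := rfl
  rw [h]
  exact List.Nodup.product (PySem.List.nodup_pyRange_one 0 n) (PySem.List.nodup_pyRange_one 0 n)

-- a fold of key-distinct inserts never disturbs a key it does not contain
theorem foldl_dpStep_get?_of_not_mem (n k : Int) (grid : List (List Int))
    (l : List (Int × Int)) (dp : PySem.Dict (Int × Int) Int) (q : Int × Int) (hq : q ∉ l) :
    (l.foldl (dpStep n k grid) dp).get? q = dp.get? q := by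
  induction l generalizing dp with
  | nil => rfl
  | cons c t ih =>
    simp only [List.foldl_cons]
    rw [ih _ (fun hmem => hq (List.mem_cons_of_mem _ hmem))]
    exact PySem.Dict.get?_insert_of_ne _ _ (fun h => hq (h ▸ List.mem_cons_self))

theorem innerBest_congr (n k : Int) (grid : List (List Int)) (i j : Int)
    (L₁ L₂ : Int × Int → Int)
    (h : ∀ a b : Int, 0 ≤ a → a < n → 0 ≤ b → b < n → cellAt grid i j < cellAt grid a b →
      L₁ (a, b) = L₂ (a, b)) :
    innerBest n k grid L₁ i j = innerBest n k grid L₂ i j := by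
  unfold innerBest
  have hstep : (fun (best : Int) (d : Int × Int) =>
      (PySem.List.pyRange 1 (k + 1) 1).foldl (fun best kk =>
        if 0 ≤ i + d.1 * kk ∧ i + d.1 * kk < n ∧ 0 ≤ j + d.2 * kk ∧ j + d.2 * kk < n ∧
           cellAt grid i j < cellAt grid (i + d.1 * kk) (j + d.2 * kk) then
          max best (L₁ (i + d.1 * kk, j + d.2 * kk))
        else best) best)
      = (fun (best : Int) (d : Int × Int) =>
      (PySem.List.pyRange 1 (k + 1) 1).foldl (fun best kk =>
        if 0 ≤ i + d.1 * kk ∧ i + d.1 * kk < n ∧ 0 ≤ j + d.2 * kk ∧ j + d.2 * kk < n ∧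
           cellAt grid i j < cellAt grid (i + d.1 * kk) (j + d.2 * kk) then
          max best (L₂ (i + d.1 * kk, j + d.2 * kk))
        else best) best) := by
    funext best d
    have : (fun (best : Int) (kk : Int) =>
        if 0 ≤ i + d.1 * kk ∧ i + d.1 * kk < n ∧ 0 ≤ j + d.2 * kk ∧ j + d.2 * kk < n ∧
           cellAt grid i j < cellAt grid (i + d.1 * kk) (j + d.2 * kk) then
          max best (L₁ (i + d.1 * kk, j + d.2 * kk))
        else best)
        = (fun (best : Int) (kk : Int) =>
        if 0 ≤ i + d.1 * kk ∧ i + d.1 * kk < n ∧ 0 ≤ j + d.2 * kk ∧ j + d.2 * kk < n ∧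
           cellAt grid i j < cellAt grid (i + d.1 * kk) (j + d.2 * kk) then
          max best (L₂ (i + d.1 * kk, j + d.2 * kk))
        else best) := by
      funext best kk
      split_ifs with hc
      · rw [h _ _ hc.1 hc.2.1 hc.2.2.1 hc.2.2.2.1 hc.2.2.2.2]
      · rfl
    rw [this]
  rw [hstep]

-- B-side fixpoint: every cell of the finished dp table satisfies the DP recurrence
theorem buildDp_getD (n k : Int) (grid : List (List Int)) (c : Int × Int)
    (hc : c ∈ cellsOf n) :
    (buildDp n k grid).getD c 0 =
      cellAt grid c.1 c.2 +
        innerBest n k grid (fun q => (buildDp n k grid).getD q 0) c.1 c.2 := by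
  have hmain : ∀ (sc : List (Int × Int)), sc.Nodup →
      sc.Pairwise (fun a b => cellAt grid b.1 b.2 ≤ cellAt grid a.1 a.2) →
      (∀ a b : Int, 0 ≤ a → a < n → 0 ≤ b → b < n → (a, b) ∈ sc) →
      ∀ c' ∈ sc,
      (sc.foldl (dpStep n k grid) PySem.Dict.empty).getD c' 0 =
        cellAt grid c'.1 c'.2 +
          innerBest n k grid (fun q => (sc.foldl (dpStep n k grid) PySem.Dict.empty).getD q 0)
            c'.1 c'.2 := by
    intro sc hnd hpw hall c' hc'
    obtain ⟨t₁, t₂, rfl⟩ := List.append_of_mem hc'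
    rw [List.nodup_append] at hnd
    have hc'nt₂ : c' ∉ t₂ := (List.nodup_cons.mp hnd.2.1).1
    have hdisj : ∀ q ∈ t₁, q ∉ c' :: t₂ := fun q hq hmem => hnd.2.2 q hq q hmem rfl
    rw [List.foldl_append, List.foldl_cons]
    have hget : (t₂.foldl (dpStep n k grid)
        (dpStep n k grid (t₁.foldl (dpStep n k grid) PySem.Dict.empty) c')).get? c' =
        some (cellAt grid c'.1 c'.2 +
          innerBest n k grid
            (fun q => (t₁.foldl (dpStep n k grid) PySem.Dict.empty).getD q 0) c'.1 c'.2) := by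
      rw [foldl_dpStep_get?_of_not_mem n k grid t₂ _ _ hc'nt₂]
      simp only [dpStep]
      exact PySem.Dict.get?_insert_self _ _ _
    rw [PySem.Dict.getD_eq_get?_getD, hget, Option.getD_some]
    congr 1
    apply innerBest_congr
    intro a b ha1 ha2 hb1 hb2 hgt
    have hq'sc : (a, b) ∈ t₁ ++ c' :: t₂ := hall a b ha1 ha2 hb1 hb2
    have hq't₁ : (a, b) ∈ t₁ := by
      rcases List.mem_append.mp hq'sc with hm | hm
      · exact hm
      · exfalso
        rcases List.mem_cons.mp hm with hm | hm
        · rw [← hm] at hgt; simp at hgt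
        · have hR := (List.pairwise_cons.mp (List.pairwise_append.mp hpw).2.1).1 _ hm
          exact absurd hgt (not_lt.mpr hR)
    have hstable : (t₂.foldl (dpStep n k grid)
        (dpStep n k grid (t₁.foldl (dpStep n k grid) PySem.Dict.empty) c')).get? (a, b) =
        (t₁.foldl (dpStep n k grid) PySem.Dict.empty).get? (a, b) := by
      rw [foldl_dpStep_get?_of_not_mem n k grid t₂ _ _
        (fun hmem => hdisj _ hq't₁ (List.mem_cons_of_mem _ hmem))]
      simp only [dpStep]
      exact PySem.Dict.get?_insert_of_ne _ _ (fun h => hdisj _ hq't₁ (h ▸ List.mem_cons_self))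
    rw [PySem.Dict.getD_eq_get?_getD, PySem.Dict.getD_eq_get?_getD, hstable]
  have h1 : (PySem.List.sorted (cellsOf n) (fun c => cellAt grid c.1 c.2) true).Nodup :=
    (PySem.List.sorted_perm (cellsOf n) (fun c => cellAt grid c.1 c.2) true).nodup_iff.mpr
      (nodup_cellsOf n)
  have h2 : (PySem.List.sorted (cellsOf n) (fun c => cellAt grid c.1 c.2) true).Pairwise
      (fun a b => cellAt grid b.1 b.2 ≤ cellAt grid a.1 a.2) := by
    simpa using PySem.List.sorted_pairwise_rev (cellsOf n) (fun c => cellAt grid c.1 c.2)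
  have h3 : ∀ a b : Int, 0 ≤ a → a < n → 0 ≤ b → b < n →
      (a, b) ∈ PySem.List.sorted (cellsOf n) (fun c => cellAt grid c.1 c.2) true := by
    intro a b ha1 ha2 hb1 hb2
    rw [PySem.List.mem_sorted]
    exact mem_cellsOf.mpr ⟨⟨ha1, ha2⟩, hb1, hb2⟩
  exact hmain _ h1 h2 h3 c (by rw [PySem.List.mem_sorted]; exact hc)

-- a max-accumulating fold from a nonnegative start pulls its start out front
theorem foldl_max_init (l : List Int) (f : Int → Int) (b : Int) (hb : 0 ≤ b) :
    l.foldl (fun m kk => max m (f kk)) b = max b (l.foldl (fun m kk => max m (f kk)) 0) := by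
  induction l generalizing b with
  | nil => simp; omega
  | cons a t ih =>
    simp only [List.foldl_cons]
    rw [ih (max b (f a)) (by omega), ih (max 0 (f a)) (by omega)]
    omega

-- a max-accumulating fold from 0 is nonnegative
theorem foldl_max_nonneg (l : List Int) (f : Int → Int) :
    0 ≤ l.foldl (fun m kk => max m (f kk)) 0 := by
  have h := foldl_max_init l f 0 le_rfl
  omega

-- B's guarded max-fold equals A's fold shape, with the start pulled out
theorem foldl_dir (l : List Int) (c : Int → Prop) [DecidablePred c] (x : Int → Int)
    (b : Int) (hb : 0 ≤ b) :
    l.foldl (fun m kk => if c kk then max m (x kk) else m) b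
      = max b (l.foldl (fun m kk => max m (if c kk then x kk else 0)) 0) := by
  induction l generalizing b with
  | nil => simp; omega
  | cons a t ih =>
    simp only [List.foldl_cons]
    rw [ih (if c a then max b (x a) else b) (by split_ifs <;> omega)]
    rw [foldl_max_init t _ (max 0 (if c a then x a else 0)) (by omega)]
    split_ifs with hca <;> omega

-- B's four chained direction folds equal the max of four folds in A's shape
theorem chain4 (l : List Int) (c1 c2 c3 c4 : Int → Prop)
    [DecidablePred c1] [DecidablePred c2] [DecidablePred c3] [DecidablePred c4]
    (x1 x2 x3 x4 : Int → Int) :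
    l.foldl (fun m kk => if c4 kk then max m (x4 kk) else m)
      (l.foldl (fun m kk => if c3 kk then max m (x3 kk) else m)
        (l.foldl (fun m kk => if c2 kk then max m (x2 kk) else m)
          (l.foldl (fun m kk => if c1 kk then max m (x1 kk) else m) 0)))
    = max (l.foldl (fun m kk => max m (if c1 kk then x1 kk else 0)) 0)
        (max (l.foldl (fun m kk => max m (if c2 kk then x2 kk else 0)) 0)
          (max (l.foldl (fun m kk => max m (if c3 kk then x3 kk else 0)) 0)
            (l.foldl (fun m kk => max m (if c4 kk then x4 kk else 0)) 0))) := by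
  have h1 : 0 ≤ l.foldl (fun m kk => max m (if c1 kk then x1 kk else 0)) 0 :=
    foldl_max_nonneg l _
  have h2 : 0 ≤ l.foldl (fun m kk => max m (if c2 kk then x2 kk else 0)) 0 :=
    foldl_max_nonneg l _
  have h3 : 0 ≤ l.foldl (fun m kk => max m (if c3 kk then x3 kk else 0)) 0 :=
    foldl_max_nonneg l _
  have h4 : 0 ≤ l.foldl (fun m kk => max m (if c4 kk then x4 kk else 0)) 0 :=
    foldl_max_nonneg l _
  rw [foldl_dir l c1 x1 0 le_rfl]
  rw [foldl_dir l c2 x2 _ (le_max_left 0 _)]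
  rw [foldl_dir l c3 x3 _ (le_trans (le_max_left 0 _) (le_max_left _ _))]
  rw [foldl_dir l c4 x4 _ (le_trans (le_trans (le_max_left 0 _) (le_max_left _ _)) (le_max_left _ _))]
  omega

-- A-side: dfs equals a lookup in B's dp table (fuel induction on the termination measure)
set_option maxHeartbeats 1000000 in
theorem dfsA_eq (n k : Int) (grid : List (List Int)) :
    ∀ (N : Nat) (val : Int), countGT n grid val ≤ N →
    ∀ (visited : List (Int × Int)), (∀ c ∈ visited, cellAt grid c.1 c.2 ≤ val) →
    ∀ (i j : Int),
    dfsA n k grid visited i j val =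
      if 0 ≤ i ∧ i < n ∧ 0 ≤ j ∧ j < n ∧ val < cellAt grid i j then
        (buildDp n k grid).getD (i, j) 0
      else 0 := by
  intro N
  induction N with
  | zero =>
    intro val hval visited hvis i j
    rw [dfsA]
    split
    case isTrue h =>
      rw [if_neg]
      rintro ⟨c1, c2, c3, c4, c5⟩
      rcases h with h | h | h | h | h | h
      · omega
      · omega
      · omega
      · omega
      · exact absurd c5 (not_lt.mpr (hvis _ h))
      · omega
    case isFalse h =>
      exfalso
      push_neg at h
      have hpos : 0 < countGT n grid val := by
        apply List.countP_pos_iff.mpr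
        exact ⟨(i, j), mem_cellsOf.mpr ⟨⟨h.1, h.2.1⟩, h.2.2.1, h.2.2.2.1⟩,
          by simpa using h.2.2.2.2.2⟩
      omega
  | succ N ih =>
    intro val hval visited hvis i j
    rw [dfsA]
    split
    case isTrue h =>
      rw [if_neg]
      rintro ⟨c1, c2, c3, c4, c5⟩
      rcases h with h | h | h | h | h | h
      · omega
      · omega
      · omega
      · omega
      · exact absurd c5 (not_lt.mpr (hvis _ h))
      · omega
    case isFalse h =>
      push_neg at h
      obtain ⟨hi0, hin, hj0, hjn, hnv, hgt⟩ := h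
      rw [if_pos ⟨hi0, hin, hj0, hjn, hgt⟩]
      rw [buildDp_getD n k grid (i, j) (mem_cellsOf.mpr ⟨⟨hi0, hin⟩, hj0, hjn⟩)]
      have hcnt : countGT n grid (cellAt grid i j) ≤ N := by
        have := countGT_lt n grid i j val hi0 hin hj0 hjn hgt; omega
      have hrec : ∀ a b : Int,
          dfsA n k grid ((i, j) :: visited) a b (cellAt grid i j) =
            if 0 ≤ a ∧ a < n ∧ 0 ≤ b ∧ b < n ∧ cellAt grid i j < cellAt grid a b then
              (buildDp n k grid).getD (a, b) 0
            else 0 := by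
        intro a b
        apply ih _ hcnt
        intro c hcm
        rcases List.mem_cons.mp hcm with rfl | hcm
        · exact le_refl _
        · exact le_of_lt (lt_of_le_of_lt (hvis c hcm) hgt)
      simp only [hrec]
      simp only [innerBest, dirs, List.foldl_cons, List.foldl_nil]
      simp only [neg_one_mul, one_mul, zero_mul, add_zero, ← sub_eq_add_neg]
      rw [chain4]
      omega

-- ===== VERDICT (by name: the statement is the Claim_ definition above) =====
theorem get_spec : Claim_equal_get := by
  intro n k grid _ _
  unfold Spec_get _root_.get get_alt
  rw [dfsA_eq n k grid (countGT n grid 0) 0 le_rfl [] (by simp) 0 0]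
  by_cases hn : n ≤ 0
  · rw [if_pos hn, if_neg (by intro hh; omega)]
  · rw [if_neg hn]
    push_neg at hn
    by_cases hg : cellAt grid 0 0 ≤ 0
    · rw [if_pos hg, if_neg (fun hh => absurd hh.2.2.2.2 (not_lt.mpr hg))]
    · rw [if_neg hg, if_pos ⟨le_rfl, hn, le_rfl, hn, not_le.mp hg⟩]
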